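-- pv_equiv track=rewrite | github.com/dPapeCispa/OutputGeneration | OutputGeneration/function_extractors/c_function_extractor.py | extract_function_by_lines
-- ===== SOURCE A (Python) =====
-- from typing import List
--
-- def extract_function_by_lines(output: str, line_nums: List[int]) -> List[str]:
--     functions = list()
--     split_output = output.split('\n')
--     for line_num in line_nums:
--         function = ""
--         cnt_braket = 0
--         found_start = False
--         for i, line in enumerate(split_output):
--             if(i >= line_num):
--                 function = function + line + '\n'
--                 if line.count("{") > 0:
--                     found_start = True
--                     cnt_braket += line.count("{")
--                 if line.count("}") > 0:
--                     cnt_braket -= line.count("}")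
--                 if cnt_braket == 0 and found_start == True:
--                     functions.append(function)
--                     break
--         if(cnt_braket != 0):
--             functions.append(None)
--     return functions
-- ===== SOURCE B (Python) =====
-- from typing import List
--
--
-- def extract_function_by_lines(output: str, line_nums: List[int]) -> List[str]:
--     lines = output.split('\n')
--     L = len(lines)
--     # prefix brace-balance: pre[k] = balance of lines[:k]
--     pre = [0]
--     bal = 0
--     for line in lines:
--         bal += line.count('{') - line.count('}')
--         pre.append(bal)
--     # rnxt reversed: nxt[i] = first index >= i whose line contains '{', else L
--     rnxt = [L]
--     for i in range(L - 1, -1, -1):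
--         rnxt.append(i if '{' in lines[i] else rnxt[-1])
--     nxt = rnxt[::-1]
--     result = []
--     for n in line_nums:
--         if n >= L:
--             continue
--         s = 0 if n < 0 else n
--         f = nxt[s]
--         j = f
--         while j < L and pre[j + 1] != pre[s]:
--             j += 1
--         if j < L:
--             result.append('\n'.join(lines[s:j + 1]) + '\n')
--         elif pre[L] != pre[s]:
--             result.append(None)
--     return result
-- ===== Notes on version B (the rewrite author's own statement) =====
-- stated objective: faster
-- what changed: B splits the output once and precomputes a prefix brace-balance array and a next-open-brace table; each query then starts at its own line (A enumerates every line from 0 with an index guard for every query), finds the function's end by scanning the precomputed integer balances for the matching prefix value, and emits the result with a single join instead of A's repeated string concatenation.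
import Mathlib
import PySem

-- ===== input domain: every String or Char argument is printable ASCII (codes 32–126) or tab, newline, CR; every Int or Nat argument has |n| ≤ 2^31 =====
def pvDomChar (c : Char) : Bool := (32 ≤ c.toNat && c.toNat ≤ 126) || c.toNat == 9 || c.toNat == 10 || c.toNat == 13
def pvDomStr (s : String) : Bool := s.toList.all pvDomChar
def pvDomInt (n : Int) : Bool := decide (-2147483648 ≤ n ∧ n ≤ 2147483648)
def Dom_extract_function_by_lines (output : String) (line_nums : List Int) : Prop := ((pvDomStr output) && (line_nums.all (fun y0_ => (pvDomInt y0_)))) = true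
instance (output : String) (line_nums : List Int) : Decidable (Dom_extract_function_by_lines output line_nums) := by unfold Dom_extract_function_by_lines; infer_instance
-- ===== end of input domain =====

-- B replaces A's per-query full rescan (with quadratic string concatenation) by a precomputed
-- prefix brace-balance array and a next-open-brace table, locating each function's end and
-- emitting it with one join; equivalence of return values is proved below.

-- ===== PORT A =====
-- inner loop of A: state (i, function, cnt_braket, found_start); `.inl f` = break with appended
-- function, `.inr cnt` = loop finished with final cnt_braket
def pvALoop (line_num : Int) : List String → Int → String → Int → Bool → String ⊕ Int
  | [], _, _, cnt, _ => .inr cnt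
  | line :: rest, i, func, cnt, found =>
    if i ≥ line_num then
      let func := func ++ line ++ "\n"
      let found := if PySem.Str.count line "{" > 0 then true else found
      let cnt := if PySem.Str.count line "{" > 0 then cnt + (PySem.Str.count line "{" : Int) else cnt
      let cnt := if PySem.Str.count line "}" > 0 then cnt - (PySem.Str.count line "}" : Int) else cnt
      if cnt = 0 ∧ found = true then .inl func
      else pvALoop line_num rest (i + 1) func cnt found
    else pvALoop line_num rest (i + 1) func cnt found

def extract_function_by_lines (output : String) (line_nums : List Int) : List (Option String) :=
  -- output.split('\n'): sep "\n" ≠ "", so split? is `some`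
  let split_output := (PySem.Str.split? output "\n").getD []
  line_nums.foldl (fun functions line_num =>
    match pvALoop line_num split_output 0 "" 0 false with
    | .inl f => functions ++ [some f]
    | .inr cnt => if cnt ≠ 0 then functions ++ [none] else functions) []

-- ===== PORT B =====
-- `while j < L and pre[j+1] != pre[s]: j += 1` of Source B
def pvBFind (pre : List Int) (target : Int) (L : Nat) (j : Int) : Int :=
  if h : j < (L : Int) then
    if PySem.List.pyGetD pre (j + 1) 0 ≠ target then pvBFind pre target L (j + 1) else j
  else j
termination_by ((L : Int) - j).toNat
decreasing_by omega

def extract_function_by_lines_alt (output : String) (line_nums : List Int) : List (Option String) :=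
  let lines := (PySem.Str.split? output "\n").getD []
  let L := lines.length
  -- pre[k] = brace balance of lines[:k] (running `bal` threaded as second state component)
  let pre := (lines.foldl (fun (p : List Int × Int) line =>
      let bal := p.2 + (PySem.Str.count line "{" : Int) - (PySem.Str.count line "}" : Int)
      (p.1 ++ [bal], bal)) ([0], 0)).1
  -- rnxt built back to front; indexing lines[i] is in range, pyGetD's default is never used
  let rnxt := (PySem.List.pyRange ((L : Int) - 1) (-1) (-1)).foldl
      (fun (r : List Int) i =>
        r ++ [if PySem.Str.isIn "{" (PySem.List.pyGetD lines i "") then i else PySem.List.pyGetD r (-1) 0])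
      [(L : Int)]
  let nxt := rnxt.reverse  -- rnxt[::-1]  (exact: PySem.List.slice?_none_none_neg_one)
  line_nums.foldl (fun result n =>
    if n ≥ (L : Int) then result
    else
      let s : Int := if n < 0 then 0 else n
      let f := PySem.List.pyGetD nxt s 0
      let j := pvBFind pre (PySem.List.pyGetD pre s 0) L f
      if j < (L : Int) then
        result ++ [some (PySem.Str.join "\n" (PySem.List.slice lines (some s) (some (j + 1))) ++ "\n")]
      else if PySem.List.pyGetD pre (L : Int) 0 ≠ PySem.List.pyGetD pre s 0 then result ++ [none]
      else result) []

-- ===== PRECONDITION & SPEC =====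
def Spec_extract_function_by_lines (output : String) (line_nums : List Int) (out : List (Option String)) : Prop := out = extract_function_by_lines_alt output line_nums
instance (output : String) (line_nums : List Int) (out : List (Option String)) : Decidable (Spec_extract_function_by_lines output line_nums out) := by unfold Spec_extract_function_by_lines; infer_instance

-- ===== CLAIM (what is proved, stated in full; the proofs are below) =====
def Claim_equal_extract_function_by_lines : Prop := ∀ (output : String) (line_nums : List Int), Dom_extract_function_by_lines output line_nums → Spec_extract_function_by_lines output line_nums (extract_function_by_lines output line_nums)

-- ===== LEMMAS AND PROOFS =====

def pvBal (l : String) : Int := (PySem.Str.count l "{" : Int) - (PySem.Str.count l "}" : Int)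
def pvSum (ls : List String) : Int := (ls.map pvBal).sum
def pvPre (ls : List String) (k : Nat) : Int := pvSum (ls.take k)
def pvOpen (l : String) : Bool := decide (0 < PySem.Str.count l "{")
def pvNext (ls : List String) (i : Nat) : Nat :=
  if h : i < ls.length then (if pvOpen ls[i] then i else pvNext ls (i + 1)) else ls.length
termination_by ls.length - i
def pvPreL (ls : List String) : List Int := (List.range (ls.length + 1)).map (fun k => pvPre ls k)
def pvNextL (ls : List String) : List Int := (List.range (ls.length + 1)).map (fun t => (pvNext ls t : Nat))
theorem pvPre_cons (l : String) (ls : List String) (k : Nat) :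
    pvPre (l :: ls) (k + 1) = pvBal l + pvPre ls k := by
  simp [pvPre, pvSum]

theorem pvPreFold (ls : List String) : ∀ (p : List Int) (b : Int),
    (ls.foldl (fun (p : List Int × Int) line =>
      let bal := p.2 + (PySem.Str.count line "{" : Int) - (PySem.Str.count line "}" : Int)
      (p.1 ++ [bal], bal)) (p, b))
    = (p ++ (List.range ls.length).map (fun k => b + pvPre ls (k + 1)), b + pvSum ls) := by
  induction ls with
  | nil => intro p b; simp [pvSum]
  | cons l ls ih =>
    intro p b
    rw [List.foldl_cons]
    dsimp only
    have hb : b + (PySem.Str.count l "{" : Int) - (PySem.Str.count l "}" : Int) = b + pvBal l := by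
      unfold pvBal; omega
    rw [hb, ih]
    rw [Prod.mk.injEq]
    refine ⟨?_, by simp [pvSum]; ring⟩
    rw [List.append_assoc]
    simp only [List.length_cons]
    rw [List.range_succ_eq_map]
    congr 1
    simp only [List.map_cons, List.map_map, List.singleton_append]
    congr 1
    · simp [pvPre, pvSum]
    · apply List.map_congr_left
      intro k _
      simp only [Function.comp_apply, Nat.succ_eq_add_one]
      rw [pvPre_cons]
      ring

theorem pvPre_eq (ls : List String) :
    (ls.foldl (fun (p : List Int × Int) line =>
      let bal := p.2 + (PySem.Str.count line "{" : Int) - (PySem.Str.count line "}" : Int)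
      (p.1 ++ [bal], bal)) ([0], 0)).1 = pvPreL ls := by
  rw [pvPreFold, pvPreL, List.range_succ_eq_map]
  simp only [List.map_cons, List.map_map, List.singleton_append]
  congr 1
  apply List.map_congr_left
  intro k _
  simp [Nat.succ_eq_add_one]

theorem pvPreL_get (ls : List String) (k : Nat) (hk : k ≤ ls.length) (d : Int) :
    PySem.List.pyGetD (pvPreL ls) (k : Int) d = pvPre ls k := by
  rw [PySem.List.pyGetD_natCast, pvPreL]
  rw [List.getD_eq_getElem _ _ (by simpa using Nat.lt_succ_of_le hk)]
  simp

theorem pvNextL_get (ls : List String) (s : Nat) (hs : s ≤ ls.length) (d : Int) :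
    PySem.List.pyGetD (pvNextL ls) (s : Int) d = (pvNext ls s : Int) := by
  rw [PySem.List.pyGetD_natCast, pvNextL]
  rw [List.getD_eq_getElem _ _ (by simpa using Nat.lt_succ_of_le hs)]
  simp

theorem pvNext_ge (ls : List String) (i : Nat) : i ≤ ls.length → i ≤ pvNext ls i := by
  fun_induction pvNext ls i with
  | case1 i hi hop => intro h; omega
  | case2 i hi hop ih => intro h; have h2 := ih (by omega); omega
  | case3 i hi => intro h; omega

theorem pvNext_le (ls : List String) (i : Nat) : pvNext ls i ≤ ls.length := by
  fun_induction pvNext ls i <;> omega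

theorem pvNext_hit (ls : List String) (i : Nat) (h : pvNext ls i < ls.length) :
    pvOpen (ls[pvNext ls i]'h) = true := by
  fun_induction pvNext ls i with
  | case1 i hi hop => simpa using hop
  | case2 i hi hop ih => exact ih h
  | case3 i hi => omega

theorem pvNext_min (ls : List String) (i m : Nat) (h1 : i ≤ m) (h2 : m < pvNext ls i)
    (hm : m < ls.length) : pvOpen ls[m] = false := by
  fun_induction pvNext ls i with
  | case1 i hi hop => omega
  | case2 i hi hop ih =>
    by_cases he : i = m
    · subst he; simpa using hop
    · exact ih (by omega) h2
  | case3 i hi => omega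

theorem pvPre_split (ls : List String) (s k : Nat) :
    pvPre ls (s + k) = pvPre ls s + pvPre (ls.drop s) k := by
  unfold pvPre pvSum
  rw [List.take_add, List.map_append, List.sum_append]

theorem pvSum_drop (ls : List String) (s : Nat) :
    pvSum (ls.drop s) = pvPre ls ls.length - pvPre ls s := by
  have h1 : pvPre ls ls.length = pvSum ls := by
    unfold pvPre; rw [List.take_length]
  have h2 : pvSum ls = pvPre ls s + pvSum (ls.drop s) := by
    conv_lhs => rw [← List.take_append_drop s ls]
    simp [pvSum, pvPre]
  omega

theorem pvBoolDecide (b : Bool) (P : Prop) [Decidable P] (h : b = true ↔ P) : b = decide P := by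
  by_cases hp : P
  · rw [decide_eq_true hp]; exact h.mpr hp
  · rw [decide_eq_false hp]
    cases hb : b with
    | false => rfl
    | true => exact absurd (h.mp hb) hp

theorem pvAny_bridge (ls : List String) (s k : Nat) (hs : s < ls.length) :
    ((ls.drop s).take (k + 1)).any pvOpen
      = decide (pvNext ls s ≤ s + k ∧ pvNext ls s < ls.length) := by
  apply pvBoolDecide
  rw [List.any_eq_true]
  constructor
  · rintro ⟨x, hx, hox⟩
    rw [List.mem_iff_getElem] at hx
    obtain ⟨m, hm, hxe⟩ := hx
    have hmb := hm
    simp only [List.length_take, List.length_drop] at hmb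
    have hm1 : m < k + 1 := by omega
    have hm2 : s + m < ls.length := by omega
    have hxe2 : x = ls[s + m]'hm2 := by
      rw [← hxe]
      rw [List.getElem_take, List.getElem_drop]
    -- pvNext ls s ≤ s + m: otherwise pvOpen false there
    by_cases hlt : pvNext ls s ≤ s + m
    · exact ⟨by omega, by omega⟩
    · exfalso
      have := pvNext_min ls s (s + m) (by omega) (by omega) hm2
      rw [hxe2] at hox
      rw [this] at hox
      exact Bool.false_ne_true hox
  · rintro ⟨h1, h2⟩
    refine ⟨ls[pvNext ls s]'h2, ?_, pvNext_hit ls s h2⟩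
    rw [List.mem_iff_getElem]
    have hge := pvNext_ge ls s (by omega)
    refine ⟨pvNext ls s - s, ?_, ?_⟩
    · simp [List.length_take, List.length_drop]
      omega
    · rw [List.getElem_take, List.getElem_drop]
      congr 1
      omega

theorem pvBFind_char (pre : List Int) (t : Int) (L : Nat) :
    ∀ (j : Nat), j ≤ L →
    (pvBFind pre t L (j : Int) = (L : Int)
      ∧ ∀ m : Nat, j ≤ m → m < L → PySem.List.pyGetD pre ((m : Int) + 1) 0 ≠ t)
    ∨ (∃ m : Nat, pvBFind pre t L (j : Int) = (m : Int) ∧ j ≤ m ∧ m < L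
        ∧ PySem.List.pyGetD pre ((m : Int) + 1) 0 = t
        ∧ ∀ m' : Nat, j ≤ m' → m' < m → PySem.List.pyGetD pre ((m' : Int) + 1) 0 ≠ t) := by
  suffices H : ∀ (fuel j : Nat), j ≤ L → L - j ≤ fuel →
      (pvBFind pre t L (j : Int) = (L : Int)
        ∧ ∀ m : Nat, j ≤ m → m < L → PySem.List.pyGetD pre ((m : Int) + 1) 0 ≠ t)
      ∨ (∃ m : Nat, pvBFind pre t L (j : Int) = (m : Int) ∧ j ≤ m ∧ m < L
          ∧ PySem.List.pyGetD pre ((m : Int) + 1) 0 = t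
          ∧ ∀ m' : Nat, j ≤ m' → m' < m → PySem.List.pyGetD pre ((m' : Int) + 1) 0 ≠ t) by
    exact fun j hj => H L j hj (by omega)
  intro fuel
  induction fuel with
  | zero =>
    intro j hj hf
    have : j = L := by omega
    subst this
    rw [pvBFind, dif_neg (by omega)]
    exact .inl ⟨rfl, by omega⟩
  | succ fuel ih =>
    intro j hj hf
    by_cases hjL : j < L
    · rw [pvBFind, dif_pos (by exact_mod_cast hjL)]
      by_cases hne : PySem.List.pyGetD pre ((j : Int) + 1) 0 ≠ t
      · rw [if_pos hne]
        have hcast : (j : Int) + 1 = ((j + 1 : Nat) : Int) := by push_cast; ring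
        rw [hcast]
        rcases ih (j + 1) (by omega) (by omega) with ⟨he, hall⟩ | ⟨m, hm⟩
        · left
          refine ⟨he, ?_⟩
          intro m h1 h2
          by_cases hjm : j = m
          · subst hjm; exact hne
          · exact hall m (by omega) h2
        · right
          refine ⟨m, hm.1, by omega, hm.2.2.1, hm.2.2.2.1, ?_⟩
          intro m' h1 h2
          by_cases hjm : j = m'
          · subst hjm; exact hne
          · exact hm.2.2.2.2 m' (by omega) h2
      · rw [if_neg hne]
        simp only [ne_eq, not_not] at hne
        right
        exact ⟨j, rfl, le_rfl, hjL, hne, by omega⟩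
    · have : j = L := by omega
      subst this
      rw [pvBFind, dif_neg (by omega)]
      exact .inl ⟨rfl, by omega⟩

theorem pvNext_len (ls : List String) (i : Nat) (h : ls.length ≤ i) : pvNext ls i = ls.length := by
  rw [pvNext, dif_neg (by omega)]


theorem pvCountGo (c : Char) (l : List Char) (fuel acc : Nat) (h : l.length ≤ fuel) :
    PySem.Chars.count.go [c] fuel l acc = acc + l.count c := by
  induction l generalizing fuel acc with
  | nil => cases fuel <;> simp [PySem.Chars.count.go]
  | cons x t ih =>
    cases fuel with
    | zero => simp at h
    | succ fuel =>
      have ht : t.length ≤ fuel := by simp only [List.length_cons] at h; omega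
      rw [PySem.Chars.count.go]
      simp only [List.isPrefixOf, Bool.and_true]
      by_cases hx : (c == x) = true
      · have hcx : c = x := beq_iff_eq.mp hx
        subst hcx
        rw [if_pos (by simp)]
        simp only [List.length_cons, List.length_nil, List.drop_succ_cons, List.drop_zero]
        rw [ih _ _ ht]
        rw [List.count_cons_self]
        omega
      · have hxf : (c == x) = false := by
          cases hcc : (c == x) with
          | true => exact absurd hcc hx
          | false => rfl
        rw [if_neg (by simp [hxf])]
        rw [ih _ _ ht]
        have hxc : ¬ (x = c) := by
          intro e; rw [e] at hxf; simp at hxf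
        simp [hxc]

theorem pvCount_eq (c : Char) (cl : String) (s : String) (hc : cl.toList = [c]) :
    PySem.Str.count s cl = s.toList.count c := by
  rw [PySem.Str.count_eq, hc]
  rw [PySem.Chars.count]
  simp only [List.isEmpty_cons]
  simpa using pvCountGo c s.toList s.toList.length 0 le_rfl

theorem pvIsIn_eq (c : Char) (cl : String) (s : String) (hc : cl.toList = [c]) :
    PySem.Str.isIn cl s = decide (0 < PySem.Str.count s cl) := by
  rw [pvCount_eq c cl s hc]
  have h1 : PySem.Str.isIn cl s = true ↔ 0 < s.toList.count c := by
    rw [PySem.Str.isIn_eq, hc, PySem.Chars.isIn_iff_infix, List.singleton_infix_iff]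
    exact ⟨fun h => List.count_pos_iff.mpr h, fun h => List.count_pos_iff.mp h⟩
  by_cases h : 0 < s.toList.count c
  · rw [decide_eq_true h]
    exact h1.mpr h
  · rw [decide_eq_false h]
    cases hb : PySem.Str.isIn cl s with
    | false => rfl
    | true => exact absurd (h1.mp hb) h

theorem pvRnxtFold (ls : List String) :
    ∀ (m : Nat), m ≤ ls.length →
    (((List.range m).map (fun (k : Nat) => ((ls.length : Int) - 1) - (k : Int))).foldl
      (fun (r : List Int) i =>
        r ++ [if PySem.Str.isIn "{" (PySem.List.pyGetD ls i "") then i else PySem.List.pyGetD r (-1) 0])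
      [(ls.length : Int)])
    = (List.range (m + 1)).map (fun t => (pvNext ls (ls.length - t) : Int)) := by
  intro m
  induction m with
  | zero =>
    intro _
    simp [pvNext_len ls ls.length le_rfl]
  | succ m ih =>
    intro hm
    rw [List.range_succ, List.map_append, List.foldl_append, ih (by omega)]
    simp only [List.map_cons, List.map_nil, List.foldl_cons, List.foldl_nil]
    have hidx : ((ls.length : Int) - 1) - (m : Int) = ((ls.length - 1 - m : Nat) : Int) := by
      omega
    have hin : ls.length - 1 - m < ls.length := by omega
    have hget : PySem.List.pyGetD ls (((ls.length : Int) - 1) - (m : Int)) "" = ls[ls.length - 1 - m] := by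
      rw [hidx, PySem.List.pyGetD_natCast, List.getD_eq_getElem _ _ hin]
    have hlast : PySem.List.pyGetD ((List.range (m + 1)).map (fun t => (pvNext ls (ls.length - t) : Int))) (-1) 0
        = (pvNext ls (ls.length - m) : Int) := by
      rw [PySem.List.pyGetD_neg_one _ _ (by simp)]
      rw [List.getLast_eq_getElem]
      simp
    rw [hget, hlast]
    rw [pvIsIn_eq '{' "{" _ (by decide)]
    have hopen : (decide (0 < PySem.Str.count (ls[ls.length - 1 - m]'hin) "{")) = pvOpen (ls[ls.length - 1 - m]'hin) := rfl
    rw [hopen]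
    have harg : ls.length - 1 - m + 1 = ls.length - m := by omega
    have hstep : (if pvOpen (ls[ls.length - 1 - m]'hin) = true then ((ls.length : Int) - 1) - (m : Int)
        else (pvNext ls (ls.length - m) : Int)) = (pvNext ls (ls.length - 1 - m) : Int) := by
      conv_rhs => rw [pvNext]
      rw [dif_pos hin]
      by_cases ho : pvOpen (ls[ls.length - 1 - m]'hin) = true
      · rw [if_pos ho, if_pos ho, hidx]
      · rw [if_neg ho, if_neg ho, harg]
    rw [hstep]
    rw [List.range_succ (n := m + 1), List.map_append]
    congr 1
    simp only [List.map_cons, List.map_nil]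
    have h3 : ls.length - (m + 1) = ls.length - 1 - m := by omega
    rw [h3]

theorem pvRevMap (f : Nat → Int) (n : Nat) :
    ((List.range (n + 1)).map f).reverse = (List.range (n + 1)).map (fun t => f (n - t)) := by
  apply List.ext_getElem
  · simp
  · intro i h1 h2
    simp only [List.length_reverse, List.length_map, List.length_range] at h1
    rw [List.getElem_reverse]
    simp only [List.getElem_map, List.getElem_range, List.length_map, List.length_range]
    have h3 : n + 1 - 1 - i = n - i := by omega
    rw [h3]

theorem pvRnxt_eq (ls : List String) :
    ((PySem.List.pyRange ((ls.length : Int) - 1) (-1) (-1)).foldl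
      (fun (r : List Int) i =>
        r ++ [if PySem.Str.isIn "{" (PySem.List.pyGetD ls i "") then i else PySem.List.pyGetD r (-1) 0])
      [(ls.length : Int)]).reverse = pvNextL ls := by
  rw [PySem.List.pyRange_neg_one]
  have hlen : (((ls.length : Int) - 1) - (-1)).toNat = ls.length := by omega
  rw [hlen]
  rw [pvRnxtFold ls ls.length le_rfl]
  rw [pvRevMap]
  unfold pvNextL
  apply List.map_congr_left
  intro t ht
  simp only [List.mem_range] at ht
  have h2 : ls.length - (ls.length - t) = t := by omega
  rw [h2]

-- mirror of A's inner loop without the string accumulation: index of the break line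
def pvStop : List String → Int → Bool → Option Nat
  | [], _, _ => none
  | l :: ls, c, fd =>
    let c' := c + pvBal l
    let fd' := fd || pvOpen l
    if c' = 0 ∧ fd' = true then some 0 else (pvStop ls c' fd').map (· + 1)

-- the break condition after processing line m of the suffix
def pvP (ls : List String) (c : Int) (fd : Bool) (m : Nat) : Prop :=
  (fd || (ls.take (m + 1)).any pvOpen) = true ∧ c + pvPre ls (m + 1) = 0

-- the concatenation A builds: each processed line followed by a newline
def pvCat : List String → String
  | [] => ""
  | l :: ls => l ++ "\n" ++ pvCat ls

theorem pvP_cons_zero (l : String) (ls : List String) (c : Int) (fd : Bool) :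
    pvP (l :: ls) c fd 0 ↔ ((fd || pvOpen l) = true ∧ c + pvBal l = 0) := by
  simp [pvP, pvPre, pvSum]

theorem pvP_cons_succ (l : String) (ls : List String) (c : Int) (fd : Bool) (m : Nat) :
    pvP (l :: ls) c fd (m + 1) ↔ pvP ls (c + pvBal l) (fd || pvOpen l) m := by
  simp [pvP, pvPre, pvSum, Bool.or_assoc, add_assoc]

theorem pvStop_some (ls : List String) (c : Int) (fd : Bool) (k : Nat)
    (h : pvStop ls c fd = some k) :
    k < ls.length ∧ pvP ls c fd k ∧ ∀ m < k, ¬ pvP ls c fd m := by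
  induction ls generalizing c fd k with
  | nil => simp [pvStop] at h
  | cons l ls ih =>
    rw [pvStop] at h
    by_cases h0 : c + pvBal l = 0 ∧ (fd || pvOpen l) = true
    · rw [if_pos h0] at h
      obtain rfl : k = 0 := by simpa using h.symm
      refine ⟨by simp, (pvP_cons_zero _ _ _ _).2 ⟨h0.2, h0.1⟩, by omega⟩
    · rw [if_neg h0] at h
      cases hr : pvStop ls (c + pvBal l) (fd || pvOpen l) with
      | none => rw [hr] at h; simp at h
      | some k' =>
        rw [hr] at h
        obtain rfl : k = k' + 1 := by simpa using h.symm
        obtain ⟨hlen, hp, hmin⟩ := ih _ _ _ hr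
        refine ⟨by simpa using hlen, (pvP_cons_succ _ _ _ _ _).2 hp, ?_⟩
        intro m hm
        cases m with
        | zero =>
          rw [pvP_cons_zero]
          intro hcon
          exact h0 ⟨hcon.2, hcon.1⟩
        | succ m =>
          rw [pvP_cons_succ]
          exact hmin m (by omega)

theorem pvStop_none (ls : List String) (c : Int) (fd : Bool)
    (h : pvStop ls c fd = none) : ∀ m < ls.length, ¬ pvP ls c fd m := by
  induction ls generalizing c fd with
  | nil => simp
  | cons l ls ih =>
    rw [pvStop] at h
    by_cases h0 : c + pvBal l = 0 ∧ (fd || pvOpen l) = true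
    · rw [if_pos h0] at h; simp at h
    · rw [if_neg h0] at h
      intro m hm
      cases m with
      | zero =>
        rw [pvP_cons_zero]
        intro hcon; exact h0 ⟨hcon.2, hcon.1⟩
      | succ m =>
        rw [pvP_cons_succ]
        cases hr : pvStop ls (c + pvBal l) (fd || pvOpen l) with
        | none => exact ih _ _ hr m (by simpa using hm)
        | some k' => rw [hr] at h; simp at h

theorem pvALoop_char (ls : List String) (n : Int) :
    ∀ (i : Int) (f : String) (c : Int) (fd : Bool), n ≤ i →
    pvALoop n ls i f c fd =
      match pvStop ls c fd with
      | .some k => .inl (f ++ pvCat (ls.take (k + 1)))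
      | .none => .inr (c + pvSum ls) := by
  induction ls with
  | nil => intro i f c fd h; simp [pvALoop, pvStop, pvSum]
  | cons l ls ih =>
    intro i f c fd h
    rw [pvALoop, if_pos (by omega)]
    have hc : (if PySem.Str.count l "}" > 0 then
        (if PySem.Str.count l "{" > 0 then c + (PySem.Str.count l "{" : Int) else c) - (PySem.Str.count l "}" : Int)
        else (if PySem.Str.count l "{" > 0 then c + (PySem.Str.count l "{" : Int) else c)) = c + pvBal l := by
      unfold pvBal; split_ifs <;> omega
    have hf : (if PySem.Str.count l "{" > 0 then true else fd) = (fd || pvOpen l) := by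
      unfold pvOpen
      by_cases h0 : 0 < PySem.Str.count l "{"
      · rw [if_pos h0, decide_eq_true h0, Bool.or_true]
      · rw [if_neg h0, decide_eq_false h0, Bool.or_false]
    dsimp only
    rw [hc, hf]
    by_cases hstop : c + pvBal l = 0 ∧ (fd || pvOpen l) = true
    · rw [if_pos hstop]
      rw [pvStop]
      simp only [if_pos hstop]
      simp [pvCat, String.append_assoc, String.append_empty]
    · rw [if_neg hstop]
      rw [ih (i + 1) _ _ _ (by omega)]
      rw [pvStop]
      simp only [if_neg hstop]
      cases hr : pvStop ls (c + pvBal l) (fd || pvOpen l) with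
      | none => simp [pvSum, pvBal]; ring
      | some k => simp [pvCat, String.append_assoc]

theorem pvALoop_drop (n : Int) :
    ∀ (ls : List String) (i : Int) (f : String) (c : Int) (fd : Bool),
    pvALoop n ls i f c fd = pvALoop n (ls.drop (n - i).toNat) (i + ((n - i).toNat : Int)) f c fd := by
  intro ls
  induction ls with
  | nil => intro i f c fd; simp [pvALoop]
  | cons l ls ih =>
    intro i f c fd
    by_cases h : n ≤ i
    · have h0 : (n - i).toNat = 0 := by omega
      simp [h0]
    · have h1 : (n - i).toNat = (n - (i + 1)).toNat + 1 := by omega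
      rw [pvALoop, if_neg (by omega), ih (i + 1) f c fd, h1]
      simp only [List.drop_succ_cons]
      congr 1
      push_cast
      omega

theorem pvCat_eq_join (l : String) (ls : List String) :
    pvCat (l :: ls) = PySem.Str.join "\n" (l :: ls) ++ "\n" := by
  induction ls generalizing l with
  | nil =>
    apply String.toList_inj.mp
    simp [pvCat, PySem.Str.toList_join, PySem.Chars.join_singleton, String.toList_append]
  | cons m ls ih =>
    apply String.toList_inj.mp
    have h := congrArg String.toList (ih m)
    simp only [String.toList_append, PySem.Str.toList_join] at h ⊢
    rw [pvCat]
    simp only [String.toList_append, h]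
    simp only [List.map_cons]
    rw [PySem.Chars.join_cons_cons]
    simp [List.append_assoc]

-- per-query agreement of the two fold bodies
theorem pvQuery (ls : List String) (n : Int) (acc : List (Option String)) :
    (match pvALoop n ls 0 "" 0 false with
      | .inl f => acc ++ [some f]
      | .inr cnt => if cnt ≠ 0 then acc ++ [none] else acc)
    = (if n ≥ (ls.length : Int) then acc
       else
         let s : Int := if n < 0 then 0 else n
         let f := PySem.List.pyGetD (pvNextL ls) s 0
         let j := pvBFind (pvPreL ls) (PySem.List.pyGetD (pvPreL ls) s 0) ls.length f
         if j < (ls.length : Int) then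
           acc ++ [some (PySem.Str.join "\n" (PySem.List.slice ls (some s) (some (j + 1))) ++ "\n")]
         else if PySem.List.pyGetD (pvPreL ls) (ls.length : Int) 0 ≠ PySem.List.pyGetD (pvPreL ls) s 0 then
           acc ++ [none]
         else acc) := by
  dsimp only
  have hdrop := pvALoop_drop n ls 0 "" 0 false
  rw [Int.sub_zero] at hdrop
  rw [hdrop, pvALoop_char _ n _ "" 0 false (by omega)]
  by_cases hnL : (ls.length : Int) ≤ n
  · rw [if_pos (by omega)]
    have hde : ls.drop n.toNat = [] := List.drop_eq_nil_of_le (by omega)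
    rw [hde]
    simp [pvStop, pvSum]
  · rw [if_neg (by omega)]
    by_cases hL0 : ls.length = 0
    · -- ls is empty (L = 0, so n < 0): both sides leave acc unchanged
      have hnil : ls = [] := List.eq_nil_of_length_eq_zero hL0
      subst hnil
      have hn0 : n < 0 := by omega
      simp [pvStop, pvSum, pvNextL, pvPreL, pvNext, pvPre, pvBFind, hn0]
    have hsL : n.toNat < ls.length := by omega
    have hs : (if n < 0 then (0 : Int) else n) = ((n.toNat : Nat) : Int) := by split_ifs <;> omega
    rw [hs, pvNextL_get ls n.toNat (le_of_lt hsL) 0, pvPreL_get ls n.toNat (le_of_lt hsL) 0,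
        pvPreL_get ls ls.length le_rfl 0]
    have hgle := pvNext_le ls n.toNat
    have hgge := pvNext_ge ls n.toNat (by omega)
    have hldrop : (ls.drop n.toNat).length = ls.length - n.toNat := by simp
    have hbridge : ∀ k : Nat, pvP (ls.drop n.toNat) 0 false k ↔
        (pvNext ls n.toNat ≤ n.toNat + k ∧ pvNext ls n.toNat < ls.length
          ∧ pvPre ls (n.toNat + k + 1) = pvPre ls n.toNat) := by
      intro k
      unfold pvP
      rw [Bool.false_or, pvAny_bridge ls n.toNat k hsL]
      have hsplit : pvPre ls (n.toNat + k + 1) = pvPre ls n.toNat + pvPre (ls.drop n.toNat) (k + 1) :=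
        pvPre_split ls n.toNat (k + 1)
      simp only [decide_eq_true_eq, zero_add]
      constructor
      · rintro ⟨⟨h1, h2⟩, h3⟩
        exact ⟨h1, h2, by omega⟩
      · rintro ⟨h1, h2, h3⟩
        exact ⟨⟨h1, h2⟩, by omega⟩
    rcases pvBFind_char (pvPreL ls) (pvPre ls n.toNat) ls.length (pvNext ls n.toNat) hgle with
      ⟨hres, hnone⟩ | ⟨m, hres, hgm, hmL, heq, hmin⟩
    · -- no matching line: A's loop runs off the end, B's scan returns L
      rw [hres, if_neg (by omega)]
      have hstop : pvStop (ls.drop n.toNat) 0 false = none := by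
        cases hst : pvStop (ls.drop n.toNat) 0 false with
        | none => rfl
        | some k =>
          exfalso
          obtain ⟨hk, hp, -⟩ := pvStop_some _ _ _ _ hst
          rw [hbridge k] at hp
          obtain ⟨h1, h2, h3⟩ := hp
          have hlt : n.toNat + k < ls.length := by omega
          have := hnone (n.toNat + k) (by omega) hlt
          rw [show ((n.toNat + k : Nat) : Int) + 1 = (((n.toNat + k + 1 : Nat)) : Int) by push_cast; ring,
              pvPreL_get ls (n.toNat + k + 1) (by omega) 0] at this
          exact this h3
      rw [hstop]
      dsimp only
      have hsum : pvSum (ls.drop n.toNat) = pvPre ls ls.length - pvPre ls n.toNat :=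
        pvSum_drop ls n.toNat
      by_cases hc : pvPre ls ls.length = pvPre ls n.toNat
      · rw [if_neg (by omega), if_neg (by omega)]
      · rw [if_pos (by omega), if_pos (by omega)]
    · -- B finds the first closing line m; A's loop breaks there
      rw [hres, if_pos (by exact_mod_cast hmL)]
      have hm1 : PySem.List.pyGetD (pvPreL ls) ((m : Int) + 1) 0 = pvPre ls (m + 1) := by
        rw [show ((m : Nat) : Int) + 1 = (((m + 1 : Nat)) : Int) by push_cast; ring,
            pvPreL_get ls (m + 1) (by omega) 0]
      rw [hm1] at heq
      have hminN : ∀ m' : Nat, pvNext ls n.toNat ≤ m' → m' < m → pvPre ls (m' + 1) ≠ pvPre ls n.toNat := by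
        intro m' h1 h2
        have := hmin m' h1 h2
        rw [show ((m' : Nat) : Int) + 1 = (((m' + 1 : Nat)) : Int) by push_cast; ring,
            pvPreL_get ls (m' + 1) (by omega) 0] at this
        exact this
      have hPm : pvP (ls.drop n.toNat) 0 false (m - n.toNat) := by
        rw [hbridge]
        refine ⟨by omega, by omega, ?_⟩
        rw [show n.toNat + (m - n.toNat) + 1 = m + 1 by omega]
        exact heq
      have hstop : pvStop (ls.drop n.toNat) 0 false = some (m - n.toNat) := by
        cases hst : pvStop (ls.drop n.toNat) 0 false with
        | none =>
          exfalso
          exact pvStop_none _ _ _ hst (m - n.toNat) (by omega) hPm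
        | some k =>
          obtain ⟨hk, hp, hmink⟩ := pvStop_some _ _ _ _ hst
          rw [hbridge k] at hp
          obtain ⟨h1, h2, h3⟩ := hp
          have hge : m ≤ n.toNat + k := by
            by_contra hcon
            exact hminN (n.toNat + k) (by omega) (by omega) h3
          have hle : k ≤ m - n.toNat := by
            by_contra hcon
            exact hmink (m - n.toNat) (by omega) hPm
          congr 1
          omega
      rw [hstop]
      dsimp only
      have hslice : PySem.List.slice ls (some ((n.toNat : Nat) : Int)) (some ((m : Int) + 1))
          = (ls.drop n.toNat).take (m - n.toNat + 1) := by
        rw [show ((m : Nat) : Int) + 1 = ((n.toNat : Nat) : Int) + ((m - n.toNat + 1 : Nat) : Int) by push_cast; omega]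
        exact PySem.List.slice_natCast_add ls n.toNat (m - n.toNat + 1)
      rw [hslice]
      have htne : (ls.drop n.toNat).take (m - n.toNat + 1) ≠ [] := by
        have : m - n.toNat < (ls.drop n.toNat).length := by
          rw [hldrop]; omega
        intro hnil
        have := congrArg List.length hnil
        simp [List.length_take] at this
        omega
      cases ht : (ls.drop n.toNat).take (m - n.toNat + 1) with
      | nil => exact absurd ht htne
      | cons a as =>
        rw [pvCat_eq_join]
        rw [show ("" : String) ++ (PySem.Str.join "\n" (a :: as) ++ "\n") = PySem.Str.join "\n" (a :: as) ++ "\n" from by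
          apply String.toList_inj.mp
          simp [String.toList_append]]

theorem pvFoldCongr {α β : Type} (f g : β → α → β) (l : List α) (init : β)
    (h : ∀ acc x, f acc x = g acc x) : l.foldl f init = l.foldl g init := by
  induction l generalizing init with
  | nil => rfl
  | cons x xs ih => rw [List.foldl_cons, List.foldl_cons, h, ih]

-- ===== VERDICT (by name: the statement is the Claim_ definition above) =====
theorem extract_function_by_lines_spec : Claim_equal_extract_function_by_lines := by
  intro output line_nums _dom
  unfold Spec_extract_function_by_lines
  unfold extract_function_by_lines extract_function_by_lines_alt
  generalize (PySem.Str.split? output "\n").getD [] = ls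
  simp only [pvPre_eq, pvRnxt_eq]
  apply pvFoldCongr
  intro acc n
  exact pvQuery ls n acc
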